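-- pv_equiv track=rewrite | github.com/maryamhgf/LeetCode-Solutions | 15-is-best.py | solution
-- ===== SOURCE A (Python) =====
-- def solution(numbers):
--     good = []
--     better = []
--     best = []
--     for i in numbers:
--         if i % 15 == 0:
--             best.append(i)
--             continue
--         if i % 3 == 0:
--             good.append(i)
--         if i % 5 == 0:
--             better.append(i)
--     return best, better, good
-- ===== SOURCE B (Python) =====
-- def solution(numbers):
--     best = [i for i in numbers if i % 15 == 0]
--     better = [i for i in numbers if i % 5 == 0 and i % 3 != 0]
--     good = [i for i in numbers if i % 3 == 0 and i % 5 != 0]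
--     return best, better, good
-- ===== Notes on version B (the rewrite author's own statement) =====
-- stated objective: simpler
-- what changed: Replaces the single stateful loop with continue/append accumulators by three independent filters of the input, using that a multiple of 5 is a multiple of 15 iff it is also a multiple of 3.
import Mathlib
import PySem

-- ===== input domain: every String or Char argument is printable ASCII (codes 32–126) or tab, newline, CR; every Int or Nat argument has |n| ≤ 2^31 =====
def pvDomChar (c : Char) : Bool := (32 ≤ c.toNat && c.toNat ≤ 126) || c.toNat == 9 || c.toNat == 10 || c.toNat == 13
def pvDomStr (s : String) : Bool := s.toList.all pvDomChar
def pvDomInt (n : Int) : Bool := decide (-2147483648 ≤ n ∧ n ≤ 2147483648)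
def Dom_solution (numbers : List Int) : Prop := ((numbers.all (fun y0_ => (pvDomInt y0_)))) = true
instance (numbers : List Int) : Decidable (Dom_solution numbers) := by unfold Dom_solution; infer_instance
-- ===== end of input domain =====

-- B replaces A's single stateful loop (with continue/append accumulators) by three independent filters of the input; same cost, simpler.


-- ===== PORT A =====
-- the loop carries (good, better, best) and appends like Python's list.append
def solutionLoop (xs : List Int) (good better best : List Int) :
    List Int × List Int × List Int :=
  match xs with
  | [] => (best, better, good)
  | i :: rest =>
    if PySem.Int.mod i 15 = 0 then
      solutionLoop rest good better (best ++ [i])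
    else
      let good' := if PySem.Int.mod i 3 = 0 then good ++ [i] else good
      let better' := if PySem.Int.mod i 5 = 0 then better ++ [i] else better
      solutionLoop rest good' better' best

def solution (numbers : List Int) : List Int × List Int × List Int :=
  solutionLoop numbers [] [] []

-- ===== PORT B =====
def solution_alt (numbers : List Int) : List Int × List Int × List Int :=
  (numbers.filter (fun i => PySem.Int.mod i 15 = 0),
   numbers.filter (fun i => PySem.Int.mod i 5 = 0 ∧ PySem.Int.mod i 3 ≠ 0),
   numbers.filter (fun i => PySem.Int.mod i 3 = 0 ∧ PySem.Int.mod i 5 ≠ 0))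

-- ===== PRECONDITION & SPEC =====
def Spec_solution (numbers : List Int) (out : List Int × List Int × List Int) : Prop := out = solution_alt numbers
instance (numbers : List Int) (out : List Int × List Int × List Int) : Decidable (Spec_solution numbers out) := by unfold Spec_solution; infer_instance

-- ===== CLAIM (what is proved, stated in full; the proofs are below) =====
def Claim_equal_solution : Prop := ∀ (numbers : List Int), Dom_solution numbers → Spec_solution numbers (solution numbers)

-- ===== LEMMAS AND PROOFS =====

theorem solutionLoop_eq (xs good better best : List Int) :
    solutionLoop xs good better best =
      (best ++ xs.filter (fun i => PySem.Int.mod i 15 = 0),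
       better ++ xs.filter (fun i => PySem.Int.mod i 5 = 0 ∧ PySem.Int.mod i 3 ≠ 0),
       good ++ xs.filter (fun i => PySem.Int.mod i 3 = 0 ∧ PySem.Int.mod i 5 ≠ 0)) := by
  induction xs generalizing good better best with
  | nil => simp [solutionLoop]
  | cons i rest ih =>
    have h15 : (15:Int) ∣ i ↔ ((3:Int) ∣ i ∧ (5:Int) ∣ i) := by omega
    by_cases h3 : (3:Int) ∣ i <;> by_cases h5 : (5:Int) ∣ i <;>
      simp [solutionLoop, PySem.Int.mod_eq_zero_iff_dvd, h15, h3, h5, ih, List.filter_cons]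

-- ===== VERDICT (by name: the statement is the Claim_ definition above) =====
theorem solution_spec : Claim_equal_solution := by
  intro numbers _
  show _ = _
  simp [solution, solution_alt, solutionLoop_eq]
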